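-- pv_equiv track=rewrite | github.com/graphsignal/solver-demo | solutions/A.py | forms_square
-- ===== SOURCE A (Python) =====
-- def forms_square(rectangles):
--     # Step 3 and 4: Calculate total area and determine bounding box
--     total_area = 0
--     x_min = float('inf')
--     x_max = float('-inf')
--     y_min = float('inf')
--     y_max = float('-inf')
--
--     for x1, y1, x2, y2 in rectangles:
--         # Calculate the area of each rectangle
--         total_area += (x2 - x1) * (y2 - y1)
--         # Update the bounding box coordinates
--         x_min = min(x_min, x1)
--         x_max = max(x_max, x2)
--         y_min = min(y_min, y1)
--         y_max = max(y_max, y2)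
--
--     # Calculate width and height of the bounding box
--     width = x_max - x_min
--     height = y_max - y_min
--
--     # Check if the bounding box is a square and its area equals total_area
--     if width == height and width * height == total_area:
--         return "YES"
--     else:
--         return "NO"
-- ===== SOURCE B (Python) =====
-- def forms_square(rectangles):
--     # Divide and conquer: recursively summarize halves into (area, x_min, x_max, y_min, y_max)
--     # and merge; the summary merge is associative, so this equals any linear scan.
--     def summarize(rs):
--         if len(rs) == 1:
--             x1, y1, x2, y2 = rs[0]
--             return ((x2 - x1) * (y2 - y1), x1, x2, y1, y2)
--         mid = len(rs) // 2
--         a1, xm1, xM1, ym1, yM1 = summarize(rs[:mid])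
--         a2, xm2, xM2, ym2, yM2 = summarize(rs[mid:])
--         return (a1 + a2, min(xm1, xm2), max(xM1, xM2), min(ym1, ym2), max(yM1, yM2))
--
--     if not rectangles:
--         return "NO"
--     area, x_min, x_max, y_min, y_max = summarize(rectangles)
--     width = x_max - x_min
--     height = y_max - y_min
--     return "YES" if width == height and width * height == area else "NO"
-- ===== Notes on version B (the rewrite author's own statement) =====
-- stated objective: alternative
-- what changed: Replaces A's single fused left-to-right loop with float +/-inf sentinels by a divide-and-conquer recursion that summarizes each half of the list into an (area, bounding-box) tuple and merges the two summaries (plus an explicit empty-list early return), relying on associativity of the merge.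
import Mathlib
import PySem

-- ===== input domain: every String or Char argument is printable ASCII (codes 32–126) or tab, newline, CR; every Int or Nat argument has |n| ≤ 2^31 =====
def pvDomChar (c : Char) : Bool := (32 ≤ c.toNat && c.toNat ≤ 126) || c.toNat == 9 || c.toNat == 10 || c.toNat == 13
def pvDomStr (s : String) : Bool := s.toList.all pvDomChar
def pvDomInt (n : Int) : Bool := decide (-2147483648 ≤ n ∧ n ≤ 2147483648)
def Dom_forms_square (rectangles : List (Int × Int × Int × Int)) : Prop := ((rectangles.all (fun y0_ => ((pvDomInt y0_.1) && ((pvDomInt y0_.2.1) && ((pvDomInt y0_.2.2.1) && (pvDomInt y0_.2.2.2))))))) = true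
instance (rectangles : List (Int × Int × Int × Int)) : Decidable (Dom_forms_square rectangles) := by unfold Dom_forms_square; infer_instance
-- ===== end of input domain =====

-- B replaces A's fused left-to-right loop (with float ±inf sentinels) by an empty-list early
-- return plus a divide-and-conquer recursion merging (area, bbox) summaries of the two halves;
-- same return value, no speed claim.


-- ===== PORT A =====
-- A's float ±inf sentinels are modelled by an Option bounding box (none = no rectangle seen);
-- this is exact: the floats matter only on the empty input, where Python's width = -inf = height
-- and width*height = +inf ≠ 0 (= total_area) always gives "NO", which the none branch returns.
def formsSquareStep (acc : Int × Option (Int × Int × Int × Int))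
    (r : Int × Int × Int × Int) : Int × Option (Int × Int × Int × Int) :=
  let total := acc.1 + (r.2.2.1 - r.1) * (r.2.2.2 - r.2.1)
  match acc.2 with
  | none => (total, some (r.1, r.2.2.1, r.2.1, r.2.2.2))
  | some (xmn, xmx, ymn, ymx) =>
      (total, some (min xmn r.1, max xmx r.2.2.1, min ymn r.2.1, max ymx r.2.2.2))

def forms_square (rectangles : List (Int × Int × Int × Int)) : String :=
  match rectangles.foldl formsSquareStep (0, none) with
  | (total, some (xmn, xmx, ymn, ymx)) =>
      let width := xmx - xmn
      let height := ymx - ymn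
      if width = height ∧ width * height = total then "YES" else "NO"
  | (_, none) => "NO"

-- ===== PORT B =====
-- Source B's recursive summarize: split at len//2, summarize halves, merge.
def pvMerge (s1 s2 : Int × Int × Int × Int × Int) : Int × Int × Int × Int × Int :=
  (s1.1 + s2.1, min s1.2.1 s2.2.1, max s1.2.2.1 s2.2.2.1,
   min s1.2.2.2.1 s2.2.2.2.1, max s1.2.2.2.2 s2.2.2.2.2)

def pvSummarize : List (Int × Int × Int × Int) → Int × Int × Int × Int × Int
  | [] => (0, 0, 0, 0, 0)   -- unreachable: Source B's summarize is only called on non-empty lists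
  | [r] => ((r.2.2.1 - r.1) * (r.2.2.2 - r.2.1), r.1, r.2.2.1, r.2.1, r.2.2.2)
  | r1 :: r2 :: t =>
      let rs := r1 :: r2 :: t
      let mid := rs.length / 2
      pvMerge (pvSummarize (rs.take mid)) (pvSummarize (rs.drop mid))
termination_by rs => rs.length
decreasing_by
  · simp [List.length_take]; omega
  · simp [List.length_drop]; omega

def forms_square_alt (rectangles : List (Int × Int × Int × Int)) : String :=
  match rectangles with
  | [] => "NO"
  | r :: rest =>
      let s := pvSummarize (r :: rest)
      let width := s.2.2.1 - s.2.1
      let height := s.2.2.2.2 - s.2.2.2.1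
      if width = height ∧ width * height = s.1 then "YES" else "NO"

-- ===== PRECONDITION & SPEC =====
def Spec_forms_square (rectangles : List (Int × Int × Int × Int)) (out : String) : Prop := out = forms_square_alt rectangles
instance (rectangles : List (Int × Int × Int × Int)) (out : String) : Decidable (Spec_forms_square rectangles out) := by unfold Spec_forms_square; infer_instance

-- ===== CLAIM (what is proved, stated in full; the proofs are below) =====
def Claim_equal_forms_square : Prop := ∀ (rectangles : List (Int × Int × Int × Int)), Dom_forms_square rectangles → Spec_forms_square rectangles (forms_square rectangles)

-- ===== LEMMAS AND PROOFS =====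

-- Proof-only characterisation of a non-empty list's (area, bbox) summary, as left folds.
def pvSpecOf : List (Int × Int × Int × Int) → Int × Int × Int × Int × Int
  | [] => (0, 0, 0, 0, 0)
  | r :: rest =>
      (((r :: rest).map fun q => (q.2.2.1 - q.1) * (q.2.2.2 - q.2.1)).sum,
       (rest.map fun q => q.1).foldl min r.1,
       (rest.map fun q => q.2.2.1).foldl max r.2.2.1,
       (rest.map fun q => q.2.1).foldl min r.2.1,
       (rest.map fun q => q.2.2.2).foldl max r.2.2.2)

theorem pvSpecOf_append (l1 l2 : List (Int × Int × Int × Int)) (h1 : l1 ≠ []) (h2 : l2 ≠ []) :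
    pvSpecOf (l1 ++ l2) = pvMerge (pvSpecOf l1) (pvSpecOf l2) := by
  match l1, l2 with
  | a :: t1, b :: t2 =>
    simp only [pvSpecOf, pvMerge, List.cons_append, List.map_append, List.map_cons,
      List.foldl_append, List.sum_append, List.sum_cons, List.foldl_cons, Prod.mk.injEq]
    exact ⟨by ring, List.foldl_assoc, List.foldl_assoc, List.foldl_assoc, List.foldl_assoc⟩

theorem pvSummarize_eq (rs : List (Int × Int × Int × Int)) (h : rs ≠ []) :
    pvSummarize rs = pvSpecOf rs := by
  have main : ∀ n (rs : List (Int × Int × Int × Int)), rs.length ≤ n → rs ≠ [] →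
      pvSummarize rs = pvSpecOf rs := by
    intro n
    induction n with
    | zero => intro rs hlen hne; cases rs with
        | nil => exact absurd rfl hne
        | cons a t => simp at hlen
    | succ n ih =>
      intro rs hlen hne
      match rs with
      | [r] => simp [pvSummarize, pvSpecOf]
      | r1 :: r2 :: t =>
        have hlenrs : (r1 :: r2 :: t).length = t.length + 2 := by simp
        set mid := (r1 :: r2 :: t).length / 2 with hmid
        have hmid1 : 1 ≤ mid := by simp [hmid]; omega
        have hmidlt : mid < (r1 :: r2 :: t).length := by simp [hmid]; omega
        have ht : ((r1 :: r2 :: t).take mid) ≠ [] := by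
          intro hc
          have := congrArg List.length hc
          simp [List.length_take] at this
          omega
        have hd : ((r1 :: r2 :: t).drop mid) ≠ [] := by
          intro hc
          have := congrArg List.length hc
          simp [List.length_drop] at this
          omega
        have h1 : ((r1 :: r2 :: t).take mid).length ≤ n := by
          simp [List.length_take]; omega
        have h2 : ((r1 :: r2 :: t).drop mid).length ≤ n := by
          simp [List.length_drop]; omega
        calc pvSummarize (r1 :: r2 :: t)
            = pvMerge (pvSummarize ((r1 :: r2 :: t).take mid))
                      (pvSummarize ((r1 :: r2 :: t).drop mid)) := by
              rw [pvSummarize]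
          _ = pvMerge (pvSpecOf ((r1 :: r2 :: t).take mid))
                      (pvSpecOf ((r1 :: r2 :: t).drop mid)) := by
              rw [ih _ h1 ht, ih _ h2 hd]
          _ = pvSpecOf ((r1 :: r2 :: t).take mid ++ (r1 :: r2 :: t).drop mid) :=
              (pvSpecOf_append _ _ ht hd).symm
          _ = pvSpecOf (r1 :: r2 :: t) := by rw [List.take_append_drop]
  exact main rs.length rs le_rfl h

-- A's fold from a concrete (total, some bbox) state computes the sum of areas and the
-- componentwise running min/max.
theorem foldl_formsSquareStep_char (l : List (Int × Int × Int × Int)) :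
    ∀ (t xmn xmx ymn ymx : Int),
    l.foldl formsSquareStep (t, some (xmn, xmx, ymn, ymx)) =
      (t + (l.map fun q => (q.2.2.1 - q.1) * (q.2.2.2 - q.2.1)).sum,
       some ((l.map fun q => q.1).foldl min xmn,
             (l.map fun q => q.2.2.1).foldl max xmx,
             (l.map fun q => q.2.1).foldl min ymn,
             (l.map fun q => q.2.2.2).foldl max ymx)) := by
  induction l with
  | nil => intro t xmn xmx ymn ymx; simp [List.foldl]
  | cons r l ih =>
      intro t xmn xmx ymn ymx
      simp [List.foldl, formsSquareStep, ih, add_assoc]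

-- ===== VERDICT (by name: the statement is the Claim_ definition above) =====
theorem forms_square_spec : Claim_equal_forms_square := by
  intro rectangles _
  show forms_square rectangles = forms_square_alt rectangles
  cases rectangles with
  | nil => rfl
  | cons r rest =>
      rw [forms_square_alt, pvSummarize_eq _ (by simp)]
      simp only [forms_square, List.foldl, formsSquareStep,
        foldl_formsSquareStep_char, pvSpecOf, List.map_cons, List.sum_cons]
      ring_nf
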